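-- pv_equiv track=rewrite | github.com/Viknesh-Rajaramon/Leetcode-Problems | Algorithms/Medium/3839_Number_of_Prefix_Connected_Groups/Python3.py | prefixConnected
-- ===== SOURCE A (Python) =====
-- from typing import List
-- from collections import defaultdict
--
-- def prefixConnected(words: List[str], k: int) -> int:
--     result, counts = 0, defaultdict(int)
--     for word in words:
--         if len(word) < k:
--             continue
--
--         counts[word[ : k]] += 1
--         if counts[word[ : k]] == 2:
--             result += 1
--
--     return result
-- ===== SOURCE B (Python) =====
-- from typing import List
--
--
-- def prefixConnected(words: List[str], k: int) -> int:
--     ps = sorted(w[:k] for w in words if len(w) >= k)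
--
--     def count_runs(lst):
--         if not lst:
--             return 0
--         j = 1
--         while j < len(lst) and lst[j] == lst[0]:
--             j += 1
--         return (1 if j >= 2 else 0) + count_runs(lst[j:])
--
--     return count_runs(ps)
-- ===== Notes on version B (the rewrite author's own statement) =====
-- stated objective: alternative
-- what changed: B replaces A's hash-map incremental second-occurrence detection with a sort-then-scan algorithm: it sorts the list of k-prefixes and counts maximal runs of length >= 2 by a recursive scan, using no dictionary at all.
import Mathlib
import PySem

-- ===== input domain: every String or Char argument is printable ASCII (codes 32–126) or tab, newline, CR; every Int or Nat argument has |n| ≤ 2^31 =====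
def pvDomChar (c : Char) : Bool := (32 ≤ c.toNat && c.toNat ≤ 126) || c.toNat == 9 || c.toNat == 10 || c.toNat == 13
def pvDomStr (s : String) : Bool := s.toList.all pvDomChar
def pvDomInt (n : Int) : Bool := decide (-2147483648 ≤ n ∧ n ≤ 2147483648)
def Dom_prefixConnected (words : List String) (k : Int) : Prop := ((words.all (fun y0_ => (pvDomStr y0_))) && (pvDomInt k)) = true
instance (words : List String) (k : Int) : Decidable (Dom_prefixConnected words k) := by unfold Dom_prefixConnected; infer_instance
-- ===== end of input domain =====

-- B sorts the k-prefixes and counts maximal runs of length ≥ 2 by a recursive scan (no dict),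
-- instead of A's hash-map incremental "count just reached 2" detection (objective: alternative).

-- ===== PORT A =====
def prefixConnected (words : List String) (k : Int) : Int :=
  (words.foldl
    (fun (st : Int × PySem.Dict String Int) (word : String) =>
      if PySem.Str.len word < k then st
      else
        let p := PySem.Str.slice word none (some k)
        let counts := st.2.modify p 0 (· + 1)
        if counts.getD p 0 = 2 then (st.1 + 1, counts) else (st.1, counts))
    (0, PySem.Dict.empty)).1

-- ===== PORT B =====
-- Source B's count_runs: the inner while computes the run length of the head (takeWhile);
-- lst[j:] is the remainder after the run (dropWhile).
def pvCountRuns : List String → Int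
  | [] => 0
  | p :: rest =>
    (if 2 ≤ 1 + (rest.takeWhile (fun q => q == p)).length then (1 : Int) else 0)
      + pvCountRuns (rest.dropWhile (fun q => q == p))
termination_by lst => lst.length
decreasing_by
  simp only [List.length_cons]
  exact Nat.lt_succ_of_le (List.length_dropWhile_le _ _)

def prefixConnected_alt (words : List String) (k : Int) : Int :=
  pvCountRuns
    (PySem.List.sorted
      ((words.filter (fun w => decide (k ≤ PySem.Str.len w))).map
        (fun w => PySem.Str.slice w none (some k)))
      (fun x => x) false)

-- ===== PRECONDITION & SPEC =====
def Spec_prefixConnected (words : List String) (k : Int) (out : Int) : Prop := out = prefixConnected_alt words k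
instance (words : List String) (k : Int) (out : Int) : Decidable (Spec_prefixConnected words k out) := by unfold Spec_prefixConnected; infer_instance

-- ===== CLAIM (what is proved, stated in full; the proofs are below) =====
def Claim_equal_prefixConnected : Prop := ∀ (words : List String) (k : Int), Dom_prefixConnected words k → Spec_prefixConnected words k (prefixConnected words k)

-- ===== LEMMAS AND PROOFS =====

-- A's loop body once the skip has been resolved: one prefix updates the (result, counts) state.
def pvStep (st : Int × PySem.Dict String Int) (p : String) : Int × PySem.Dict String Int :=
  let counts := st.2.modify p 0 (· + 1)
  if counts.getD p 0 = 2 then (st.1 + 1, counts) else (st.1, counts)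

-- number of distinct strings occurring at least twice in L
def pvN (L : List String) : Nat :=
  (PySem.Set.ofList L).countP (fun q => decide (2 ≤ L.count q))

theorem pvN_append (L : List String) (p : String) :
    pvN (L ++ [p]) = pvN L + (if L.count p = 1 then 1 else 0) := by
  unfold pvN
  rw [PySem.Set.ofList_append_singleton, PySem.Set.add_eq_ite]
  by_cases hp : p ∈ PySem.Set.ofList L
  · have hpL : p ∈ L := (PySem.Set.mem_ofList L p).1 hp
    simp only [if_pos hp]
    have hperm := List.perm_cons_erase hp
    rw [List.Perm.countP_eq _ hperm, List.Perm.countP_eq (fun q => decide (2 ≤ L.count q)) hperm]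
    simp only [List.countP_cons]
    have hcongr : List.countP (fun q => decide (2 ≤ (L ++ [p]).count q)) ((PySem.Set.ofList L).erase p)
        = List.countP (fun q => decide (2 ≤ L.count q)) ((PySem.Set.ofList L).erase p) := by
      apply List.countP_congr
      intro x hx
      have hxne : x ≠ p := ((PySem.Set.nodup_ofList L).mem_erase_iff.1 hx).1
      simp [List.count_append, hxne.symm]
    rw [hcongr]
    have hpos : 1 ≤ L.count p := List.count_pos_iff.2 hpL
    have hc : (L ++ [p]).count p = L.count p + 1 := by
      simp [List.count_append]
    rw [hc]
    by_cases h1 : L.count p = 1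
    · simp [h1]
    · have h2 : 2 ≤ L.count p := by omega
      simp [h2, h1]; omega
  · have hpL : p ∉ L := fun h => hp ((PySem.Set.mem_ofList L p).2 h)
    simp only [if_neg hp]
    rw [List.countP_append]
    have hcongr : List.countP (fun q => decide (2 ≤ (L ++ [p]).count q)) (PySem.Set.ofList L)
        = List.countP (fun q => decide (2 ≤ L.count q)) (PySem.Set.ofList L) := by
      apply List.countP_congr
      intro x hx
      have hxL : x ∈ L := (PySem.Set.mem_ofList L x).1 hx
      have hxne : x ≠ p := fun h => hpL (h ▸ hxL)
      simp [List.count_append, hxne.symm]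
    rw [hcongr]
    have h0 : L.count p = 0 := List.count_eq_zero.2 hpL
    simp [List.count_append, h0]

-- the fold of A's per-prefix step computes (pvN L, counter L)
theorem pvStep_foldl (L : List String) :
    L.foldl pvStep (0, PySem.Dict.empty) = ((pvN L : Int), PySem.Dict.counter L) := by
  induction L using List.reverseRecOn with
  | nil => rfl
  | append_singleton L p ih =>
    rw [List.foldl_append, ih, List.foldl_cons, List.foldl_nil]
    unfold pvStep
    rw [← PySem.Dict.counter_append_singleton, pvN_append]
    simp only [PySem.Dict.getD_counter]
    have hc : (L ++ [p]).count p = L.count p + 1 := by simp [List.count_append]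
    rw [hc]
    by_cases h1 : L.count p = 1
    · simp [h1]
    · have : ((L.count p : Int) + 1 = 2) ↔ False := by
        constructor
        · intro h; exact h1 (by omega)
        · exact False.elim
      push_cast
      simp only [this, if_neg h1]
      simp

-- A's fold over words equals the per-prefix fold over the filtered-and-sliced list
theorem pvFold_words (k : Int) (words : List String) (st : Int × PySem.Dict String Int) :
    words.foldl
      (fun (st : Int × PySem.Dict String Int) (word : String) =>
        if PySem.Str.len word < k then st
        else
          let p := PySem.Str.slice word none (some k)
          let counts := st.2.modify p 0 (· + 1)
          if counts.getD p 0 = 2 then (st.1 + 1, counts) else (st.1, counts))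
      st
    = ((words.filter (fun w => decide (k ≤ PySem.Str.len w))).map
        (fun w => PySem.Str.slice w none (some k))).foldl pvStep st := by
  induction words generalizing st with
  | nil => rfl
  | cons w ws ih =>
    by_cases h : PySem.Str.len w < k
    · have hf : ¬ (k ≤ PySem.Str.len w) := by omega
      simp only [List.foldl_cons, if_pos h, List.filter_cons, decide_eq_true_eq, hf]
      simp only at *
      exact ih st
    · have hf : k ≤ PySem.Str.len w := by omega
      simp only [List.foldl_cons, if_neg h, List.filter_cons, decide_eq_true_eq]
      rw [if_pos hf]
      simp only [List.map_cons, List.foldl_cons]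
      exact ih _

-- pvN is invariant under permutation
theorem pvN_perm (L M : List String) (h : L.Perm M) : pvN L = pvN M := by
  unfold pvN
  have hperm : (PySem.Set.ofList L).Perm (PySem.Set.ofList M) := by
    rw [List.perm_ext_iff_of_nodup (PySem.Set.nodup_ofList L) (PySem.Set.nodup_ofList M)]
    intro a
    rw [PySem.Set.mem_ofList, PySem.Set.mem_ofList]
    exact h.mem_iff
  rw [List.Perm.countP_eq _ hperm]
  apply List.countP_congr
  intro x _
  simp [h.count_eq]

-- pvN of a list whose head-run has been split off: p followed by its run r, then t with p ∉ t
theorem pvN_run (p : String) (r t : List String)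
    (hr : ∀ x ∈ r, x = p) (ht : p ∉ t) :
    pvN (p :: (r ++ t)) = (if 2 ≤ 1 + r.length then 1 else 0) + pvN t := by
  unfold pvN
  have hcount : ∀ q, (p :: (r ++ t)).count q
      = (if q = p then 1 + r.length else 0) + t.count q := by
    intro q
    by_cases hq : q = p
    · subst hq
      have : r.count q = r.length := List.count_eq_length.2 (fun x hx => ((hr x hx).symm : q = x))
      simp [List.count_append, this]; omega
    · have hcr : r.count q = 0 := List.count_eq_zero.2 (fun hx => hq (hr q hx))
      have hpq : p ≠ q := fun h => hq h.symm
      simp [List.count_append, hcr, hq, hpq]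
  have hperm : (PySem.Set.ofList (p :: (r ++ t))).Perm (p :: PySem.Set.ofList t) := by
    rw [List.perm_ext_iff_of_nodup (PySem.Set.nodup_ofList _)
      (List.nodup_cons.2 ⟨fun hp => ht ((PySem.Set.mem_ofList t p).1 hp), PySem.Set.nodup_ofList t⟩)]
    intro a
    rw [PySem.Set.mem_ofList]
    simp only [List.mem_cons, List.mem_append, PySem.Set.mem_ofList]
    constructor
    · rintro (h | h | h)
      · exact Or.inl h
      · exact Or.inl (hr a h)
      · exact Or.inr h
    · rintro (h | h)
      · exact Or.inl h
      · exact Or.inr (Or.inr h)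
  rw [List.Perm.countP_eq _ hperm, List.countP_cons]
  have hcp : (p :: (r ++ t)).count p = 1 + r.length := by
    simp [hcount p, List.count_eq_zero.2 ht]
  have hrest : List.countP (fun q => decide (2 ≤ (p :: (r ++ t)).count q)) (PySem.Set.ofList t)
      = List.countP (fun q => decide (2 ≤ t.count q)) (PySem.Set.ofList t) := by
    apply List.countP_congr
    intro x hx
    have hxt : x ∈ t := (PySem.Set.mem_ofList t x).1 hx
    have hxne : x ≠ p := fun h => ht (h ▸ hxt)
    simp [hcount x, hxne]
  rw [hrest, hcp]
  by_cases h2 : 2 ≤ 1 + r.length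
  · simp [h2]; omega
  · simp [h2]

-- on a (≤)-sorted list the run scan counts exactly the values occurring at least twice
theorem pvRuns_eq_pvN (M : List String) (h : M.Pairwise (· ≤ ·)) :
    pvCountRuns M = (pvN M : Int) := by
  induction M using pvCountRuns.induct with
  | case1 => simp [pvCountRuns, pvN, PySem.Set.ofList]
  | case2 p rest ih =>
    have hsplit : rest.takeWhile (fun q => q == p) ++ rest.dropWhile (fun q => q == p) = rest :=
      List.takeWhile_append_dropWhile
    have hr : ∀ x ∈ rest.takeWhile (fun q => q == p), x = p := by
      intro x hx
      have := List.mem_takeWhile_imp hx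
      simpa using this
    have htp : (rest.dropWhile (fun q => q == p)).Pairwise (· ≤ ·) :=
      List.Pairwise.sublist ((List.dropWhile_sublist _).cons _) h
    have hple : ∀ x ∈ rest, p ≤ x := by
      intro x hx; exact (List.pairwise_cons.1 h).1 x hx
    have ht : p ∉ rest.dropWhile (fun q => q == p) := by
      intro hmem
      cases hd : rest.dropWhile (fun q => q == p) with
      | nil => rw [hd] at hmem; exact (List.not_mem_nil) hmem
      | cons d t' =>
        have hdne : ¬ (d == p) = true := by
          have := List.head?_dropWhile_not (fun q => q == p) rest
          rw [hd] at this; simpa using this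
        have hdne' : d ≠ p := fun h' => hdne (by simp [h'])
        have hdrest : d ∈ rest := (List.dropWhile_sublist _).mem (hd ▸ List.mem_cons_self)
        have hpd : p < d := lt_of_le_of_ne (hple d hdrest) (Ne.symm hdne')
        rw [hd] at hmem
        rcases List.mem_cons.1 hmem with h' | h'
        · exact hdne' h'.symm
        · have hdt : d ≤ p := by
            have := (List.pairwise_cons.1 (hd ▸ htp)).1 p h'
            exact this
          exact absurd hdt (not_le.2 hpd)
    rw [pvCountRuns]
    rw [ih htp]
    have : pvN (p :: rest)
        = (if 2 ≤ 1 + (rest.takeWhile (fun q => q == p)).length then 1 else 0)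
          + pvN (rest.dropWhile (fun q => q == p)) := by
      conv_lhs => rw [← hsplit]
      exact pvN_run p _ _ hr ht
    rw [this]
    by_cases h2 : 2 ≤ 1 + (rest.takeWhile (fun q => q == p)).length
    · simp [h2]
    · simp [h2]

-- B's value equals pvN of the same prefix list
theorem pvAlt_eq (words : List String) (k : Int) :
    prefixConnected_alt words k
      = ((pvN ((words.filter (fun w => decide (k ≤ PySem.Str.len w))).map
          (fun w => PySem.Str.slice w none (some k))) : Nat) : Int) := by
  unfold prefixConnected_alt
  set L := (words.filter (fun w => decide (k ≤ PySem.Str.len w))).map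
      (fun w => PySem.Str.slice w none (some k)) with hL
  have hpw : (PySem.List.sorted L (fun x => x) false).Pairwise (· ≤ ·) := by
    have := PySem.List.sorted_pairwise L (fun x => x)
    simpa using this
  rw [pvRuns_eq_pvN _ hpw, pvN_perm _ L (PySem.List.sorted_perm L (fun x => x) false)]

-- ===== VERDICT (by name: the statement is the Claim_ definition above) =====
theorem prefixConnected_spec : Claim_equal_prefixConnected := by
  intro words k _
  show prefixConnected words k = prefixConnected_alt words k
  unfold prefixConnected
  rw [pvFold_words, pvStep_foldl, pvAlt_eq]
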